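-- pv_equiv track=rewrite | github.com/jsc-masshtab/vdi-server | backend/common/veil/auth/auth_dir_utils.py | get_free_ipa_user_ou
-- ===== SOURCE A (Python) =====
-- from typing import List, Optional
--
-- def get_free_ipa_user_ou(user_info: str) -> Optional[str]:
--     if not user_info:
--         return
--     if isinstance(user_info, bytes):
--         user_info = user_info.decode()
--     user_info = user_info.split(",")
--     for attr in user_info:
--         if attr.startswith("OU=") or attr.startswith("ou="):
--             return attr[3:]
-- ===== SOURCE B (Python) =====
-- def get_free_ipa_user_ou(user_info):
--     if not user_info:
--         return None
--     if isinstance(user_info, bytes):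
--         user_info = user_info.decode()
--     s = user_info
--     while True:
--         if s[:3] in ("OU=", "ou="):
--             tail = s[3:]
--             j = tail.find(",")
--             return tail if j == -1 else tail[:j]
--         j = s.find(",")
--         if j == -1:
--             return None
--         s = s[j + 1:]
-- ===== Notes on version B (the rewrite author's own statement) =====
-- stated objective: alternative
-- what changed: Replaced the split-into-a-list-then-startswith-scan with a single in-place scan of the string that checks the 3-char prefix of each suffix and jumps past the next comma, never materializing the split list.
import Mathlib
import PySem

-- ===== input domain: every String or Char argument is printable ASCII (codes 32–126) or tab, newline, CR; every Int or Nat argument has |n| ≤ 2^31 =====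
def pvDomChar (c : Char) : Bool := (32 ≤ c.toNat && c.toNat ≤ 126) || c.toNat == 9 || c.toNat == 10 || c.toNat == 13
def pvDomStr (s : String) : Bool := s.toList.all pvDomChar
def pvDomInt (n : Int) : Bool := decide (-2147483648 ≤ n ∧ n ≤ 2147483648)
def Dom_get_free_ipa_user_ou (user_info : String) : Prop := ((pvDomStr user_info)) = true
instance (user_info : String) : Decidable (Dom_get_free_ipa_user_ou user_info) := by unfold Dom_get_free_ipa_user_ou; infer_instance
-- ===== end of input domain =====

-- B replaces A's split-into-a-list-then-startswith-scan by a single in-place scan over the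
-- string's suffixes (check the 3-char prefix, else jump past the next comma); no split list is built.

-- ===== PORT A =====
-- the 'for attr in user_info: …' loop of A, one constructor per list element
def pvFindOU : List (List Char) → Option String
  | [] => none
  | a :: rest =>
    if PySem.Chars.startswith a ['O', 'U', '='] || PySem.Chars.startswith a ['o', 'u', '='] then
      some (String.ofList (PySem.Chars.slice a (some 3) none))   -- attr[3:]
    else pvFindOU rest

def get_free_ipa_user_ou (user_info : String) : Option String :=
  if user_info = "" then none                                    -- 'if not user_info: return'
  else pvFindOU (PySem.Chars.splitOn user_info.toList [','])     -- user_info.split(",")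

-- ===== PORT B =====
-- B's while loop over the remaining suffix s: 's[:3] in ("OU=", "ou=")' is take 3;
-- 's.find(",") == -1' is 'dropWhile (· ≠ ',') = []' and 's[j+1:]' is the tail after that first
-- comma; on a hit, 'tail if j == -1 else tail[:j]' is takeWhile (· ≠ ',') of tail = s[3:].
def pvAltScan (cs : List Char) : Option (List Char) :=
  if cs.take 3 = ['O', 'U', '='] ∨ cs.take 3 = ['o', 'u', '='] then
    some ((cs.drop 3).takeWhile (· ≠ ','))
  else
    match h : cs.dropWhile (· ≠ ',') with
    | [] => none
    | _ :: rest => pvAltScan rest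
termination_by cs.length
decreasing_by
  have hle : (cs.dropWhile (· ≠ ',')).length ≤ cs.length := cs.length_dropWhile_le _
  rw [h] at hle; simp at hle; omega

def get_free_ipa_user_ou_alt (user_info : String) : Option String :=
  if user_info = "" then none
  else (pvAltScan user_info.toList).map String.ofList

-- ===== PRECONDITION & SPEC =====
def Spec_get_free_ipa_user_ou (user_info : String) (out : Option String) : Prop := out = get_free_ipa_user_ou_alt user_info
instance (user_info : String) (out : Option String) : Decidable (Spec_get_free_ipa_user_ou user_info out) := by unfold Spec_get_free_ipa_user_ou; infer_instance

-- ===== CLAIM (what is proved, stated in full; the proofs are below) =====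
def Claim_equal_get_free_ipa_user_ou : Prop := ∀ (user_info : String), Dom_get_free_ipa_user_ou user_info → Spec_get_free_ipa_user_ou user_info (get_free_ipa_user_ou user_info)

-- ===== LEMMAS AND PROOFS =====

-- proof-side reference form of splitOn for the single-character separator ','
def pvMySplit (cs : List Char) : List (List Char) :=
  match h : cs.dropWhile (· ≠ ',') with
  | [] => [cs.takeWhile (· ≠ ',')]
  | _ :: rest => cs.takeWhile (· ≠ ',') :: pvMySplit rest
termination_by cs.length
decreasing_by
  have hle : (cs.dropWhile (· ≠ ',')).length ≤ cs.length := cs.length_dropWhile_le _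
  rw [h] at hle; simp at hle; omega

lemma pvMySplit_nil : pvMySplit [] = [[]] := by
  rw [pvMySplit]; rfl

lemma pvMySplit_ne_nil (cs : List Char) : pvMySplit cs ≠ [] := by
  rw [pvMySplit]; split <;> simp

lemma pvMySplit_comma (rest : List Char) : pvMySplit (',' :: rest) = [] :: pvMySplit rest := by
  rw [pvMySplit]
  have hd : (',' :: rest).dropWhile (· ≠ ',') = ',' :: rest := by simp [List.dropWhile]
  split
  · simp_all
  · rename_i x xs h
    rw [hd] at h
    cases h
    simp [List.takeWhile]

lemma pvMySplit_cons (c : Char) (rest p : List Char) (t : List (List Char)) (hc : c ≠ ',')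
    (h : pvMySplit rest = p :: t) : pvMySplit (c :: rest) = (c :: p) :: t := by
  have hd : (c :: rest).dropWhile (· ≠ ',') = rest.dropWhile (· ≠ ',') := by
    simp [List.dropWhile, hc]
  have ht : (c :: rest).takeWhile (· ≠ ',') = c :: rest.takeWhile (· ≠ ',') := by
    simp [List.takeWhile, hc]
  rw [pvMySplit] at h ⊢
  split <;> rename_i h1 <;> rw [hd] at h1
  · rw [h1] at h
    simp only [List.cons.injEq] at h
    rw [ht, h.1, ← h.2]
  · rw [h1] at h
    simp only [List.cons.injEq] at h
    rw [ht, h.1, h.2]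

lemma pvGoStep (c : Char) (rest cur : List Char) (accs : List (List Char)) (fuel : Nat) :
    PySem.Chars.splitOn.go [','] (fuel+1) (c :: rest) cur accs =
      (if ([','] : List Char).isPrefixOf (c :: rest) then
        PySem.Chars.splitOn.go [','] fuel (List.drop ([','] : List Char).length (c::rest)) [] (cur.reverse :: accs)
      else PySem.Chars.splitOn.go [','] fuel rest (c :: cur) accs) := by
  conv_lhs => rw [PySem.Chars.splitOn.go]

lemma pvGoNil (cur : List Char) (accs : List (List Char)) (fuel : Nat) :
    PySem.Chars.splitOn.go [','] (fuel+1) [] cur accs = (cur.reverse :: accs).reverse := by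
  rw [PySem.Chars.splitOn.go]
  omega

lemma pvGo_eq (fuel : Nat) : ∀ (l cur : List Char) (accs : List (List Char)) (p : List Char)
    (t : List (List Char)), l.length < fuel → pvMySplit l = p :: t →
    PySem.Chars.splitOn.go [','] fuel l cur accs = accs.reverse ++ (cur.reverse ++ p) :: t := by
  induction fuel with
  | zero => intro l _ _ _ _ h; omega
  | succ fuel ih =>
    intro l cur accs p t hlen hm
    cases l with
    | nil =>
      rw [pvMySplit_nil] at hm
      simp only [List.cons.injEq] at hm
      rw [pvGoNil, ← hm.1, ← hm.2]
      simp
    | cons c rest =>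
      rw [pvGoStep]
      by_cases hc : c = ','
      · subst hc
        rw [pvMySplit_comma] at hm
        simp only [List.cons.injEq] at hm
        obtain ⟨p', t', hm'⟩ : ∃ p' t', pvMySplit rest = p' :: t' := by
          cases h : pvMySplit rest with
          | nil => exact absurd h (pvMySplit_ne_nil rest)
          | cons a b => exact ⟨a, b, rfl⟩
        have : ([','] : List Char).isPrefixOf (',' :: rest) = true := by
          simp [List.isPrefixOf]
        rw [this]
        simp only [if_true, List.length_cons, List.length_nil, List.drop_succ_cons, List.drop_zero]
        rw [ih rest [] (cur.reverse :: accs) p' t' (by simp at hlen; omega) hm']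
        rw [← hm.1, ← hm.2, hm']
        simp
      · obtain ⟨p', t', hm'⟩ : ∃ p' t', pvMySplit rest = p' :: t' := by
          cases h : pvMySplit rest with
          | nil => exact absurd h (pvMySplit_ne_nil rest)
          | cons a b => exact ⟨a, b, rfl⟩
        rw [pvMySplit_cons c rest p' t' hc hm'] at hm
        simp only [List.cons.injEq] at hm
        have : ([','] : List Char).isPrefixOf (c :: rest) = false := by
          simp [List.isPrefixOf]; intro h; exact absurd h.symm hc
        rw [this]
        simp only [Bool.false_eq_true, if_false]
        rw [ih rest (c :: cur) accs p' t' (by simp at hlen; omega) hm']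
        rw [← hm.1, ← hm.2]
        simp

lemma pvSplitOn_comma (cs : List Char) : PySem.Chars.splitOn cs [','] = pvMySplit cs := by
  obtain ⟨p, t, hm⟩ : ∃ p t, pvMySplit cs = p :: t := by
    cases h : pvMySplit cs with
    | nil => exact absurd h (pvMySplit_ne_nil cs)
    | cons a b => exact ⟨a, b, rfl⟩
  rw [PySem.Chars.splitOn, pvGo_eq (cs.length + 1) cs [] [] p t (by omega) hm, hm]
  simp

lemma prefix3_iff (a b c : Char) (ha : a ≠ ',') (hb : b ≠ ',') (hc : c ≠ ',') (cs : List Char) :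
    ([a,b,c] : List Char).isPrefixOf (cs.takeWhile (· ≠ ',')) = true ↔ cs.take 3 = [a,b,c] := by
  rcases cs with _ | ⟨x, _ | ⟨y, _ | ⟨z, r⟩⟩⟩
  · simp [List.takeWhile]
  · by_cases hx : x = ',' <;> simp_all [List.takeWhile, List.IsPrefix]
  · by_cases hx : x = ',' <;> by_cases hy : y = ',' <;>
      simp_all [List.takeWhile, List.IsPrefix]
  · by_cases hx : x = ',' <;> by_cases hy : y = ',' <;> by_cases hz : z = ',' <;>
      simp_all [List.takeWhile] <;> aesop

lemma pvMySplit_drop_nil (cs : List Char) (h : cs.dropWhile (· ≠ ',') = []) :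
    pvMySplit cs = [cs.takeWhile (· ≠ ',')] := by
  rw [pvMySplit]; split
  · rfl
  · rename_i x xs heq; rw [h] at heq; cases heq

lemma pvMySplit_drop_cons (cs : List Char) (x : Char) (rest : List Char)
    (h : cs.dropWhile (· ≠ ',') = x :: rest) :
    pvMySplit cs = cs.takeWhile (· ≠ ',') :: pvMySplit rest := by
  rw [pvMySplit]; split
  · rename_i heq; rw [h] at heq; cases heq
  · rename_i x' xs' heq; rw [h] at heq; cases heq; rfl

lemma pvCond_iff (cs : List Char) :
    (PySem.Chars.startswith (cs.takeWhile (· ≠ ',')) ['O','U','='] ||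
      PySem.Chars.startswith (cs.takeWhile (· ≠ ',')) ['o','u','=']) = true ↔
    (cs.take 3 = ['O','U','='] ∨ cs.take 3 = ['o','u','=']) := by
  simp only [PySem.Chars.startswith, Bool.or_eq_true]
  rw [prefix3_iff 'O' 'U' '=' (by decide) (by decide) (by decide),
      prefix3_iff 'o' 'u' '=' (by decide) (by decide) (by decide)]

lemma pvTake3_shape (cs : List Char) (a b c : Char) (h : cs.take 3 = [a,b,c]) :
    ∃ r, cs = a :: b :: c :: r := by
  rcases cs with _ | ⟨x, _ | ⟨y, _ | ⟨z, r⟩⟩⟩ <;> simp_all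

lemma pvTakeDrop3 (a b c : Char) (r : List Char) (ha : a ≠ ',') (hb : b ≠ ',') (hc : c ≠ ',') :
    ((a :: b :: c :: r).takeWhile (· ≠ ',')).drop 3 = r.takeWhile (· ≠ ',') := by
  simp [List.takeWhile, ha, hb, hc]

lemma pvFind_eq_scan (cs : List Char) :
    pvFindOU (pvMySplit cs) = (pvAltScan cs).map String.ofList := by
  induction cs using pvAltScan.induct with
  | case1 cs hcond =>
    rw [pvAltScan]
    rw [if_pos hcond]
    have hpre : (PySem.Chars.startswith (cs.takeWhile (· ≠ ',')) ['O','U','='] ||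
        PySem.Chars.startswith (cs.takeWhile (· ≠ ',')) ['o','u','=']) = true :=
      (pvCond_iff cs).mpr hcond
    have hval : PySem.Chars.slice (cs.takeWhile (· ≠ ',')) (some 3) none =
        (cs.drop 3).takeWhile (· ≠ ',') := by
      have h3 : PySem.Chars.slice (cs.takeWhile (· ≠ ',')) (some 3) none =
          (cs.takeWhile (· ≠ ',')).drop 3 := by
        rw [PySem.Chars.slice_eq_listSlice]
        have := PySem.List.slice_from_natCast (cs.takeWhile (· ≠ ',')) 3
        norm_num at this ⊢
        exact this
      rw [h3]
      rcases hcond with h | h <;>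
        obtain ⟨r, rfl⟩ := pvTake3_shape cs _ _ _ h <;>
        rw [pvTakeDrop3 _ _ _ _ (by decide) (by decide) (by decide)] <;> simp
    cases hdrop : cs.dropWhile (· ≠ ',') with
    | nil => rw [pvMySplit_drop_nil cs hdrop, pvFindOU, if_pos hpre, hval]; rfl
    | cons x rest => rw [pvMySplit_drop_cons cs x rest hdrop, pvFindOU, if_pos hpre, hval]; rfl
  | case2 cs hcond hdrop =>
    rw [pvAltScan, if_neg hcond, hdrop]
    have hpre : ¬ (PySem.Chars.startswith (cs.takeWhile (· ≠ ',')) ['O','U','='] ||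
        PySem.Chars.startswith (cs.takeWhile (· ≠ ',')) ['o','u','=']) = true := by
      rw [pvCond_iff]; exact hcond
    rw [pvMySplit_drop_nil cs hdrop, pvFindOU, if_neg hpre, pvFindOU]
    rfl
  | case3 cs hcond x rest hdrop ih =>
    rw [pvAltScan, if_neg hcond, hdrop]
    have hpre : ¬ (PySem.Chars.startswith (cs.takeWhile (· ≠ ',')) ['O','U','='] ||
        PySem.Chars.startswith (cs.takeWhile (· ≠ ',')) ['o','u','=']) = true := by
      rw [pvCond_iff]; exact hcond
    rw [pvMySplit_drop_cons cs x rest hdrop, pvFindOU, if_neg hpre]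
    exact ih

-- ===== VERDICT (by name: the statement is the Claim_ definition above) =====
theorem get_free_ipa_user_ou_spec : Claim_equal_get_free_ipa_user_ou := by
  intro s _
  unfold Spec_get_free_ipa_user_ou get_free_ipa_user_ou get_free_ipa_user_ou_alt
  split
  · rfl
  · rw [pvSplitOn_comma, pvFind_eq_scan]
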